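-- pv_equiv track=rewrite | github.com/shermamatov/sea-battle- | sea-battle.py | is_ship_sunk
-- ===== SOURCE A (Python) =====
-- def is_ship_sunk(board, row, col):
--     stack = [(row, col)]
--     visited = set()
--     while stack:
--         r, c = stack.pop()
--         if (r, c) in visited or board[r][c] != "H":
--             continue
--         visited.add((r, c))
--         for dr, dc in ((0, 1), (1, 0), (0, -1), (-1, 0)):
--             nr, nc = r + dr, c + dc
--             if 0 <= nr < 7 and 0 <= nc < 7:
--                 stack.append((nr, nc))
--     for r, c in visited:
--         for dr, dc in ((0, 1), (1, 0), (0, -1), (-1, 0)):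
--             nr, nc = r + dr, c + dc
--             if 0 <= nr < 7 and 0 <= nc < 7 and board[nr][nc] == "S":
--                 return False
--     return True
-- ===== SOURCE B (Python) =====
-- DIRS = ((0, 1), (1, 0), (0, -1), (-1, 0))
--
--
-- def is_ship_sunk(board, row, col):
--     # Whole-grid fixed-point labeling instead of a stack flood-fill: grow the
--     # connected component of hit cells by repeated full-grid sweeps until stable.
--     if board[row][col] != "H":
--         return True
--     comp = {(row, col)}
--     while True:
--         frontier = [(r, c) for r in range(7) for c in range(7)
--                     if board[r][c] == "H" and (r, c) not in comp
--                     and any((r + dr, c + dc) in comp for dr, dc in DIRS)]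
--         if not frontier:
--             break
--         comp.update(frontier)
--     return not any(0 <= r + dr < 7 and 0 <= c + dc < 7 and board[r + dr][c + dc] == "S"
--                    for r, c in comp for dr, dc in DIRS)
-- ===== Notes on version B (the rewrite author's own statement) =====
-- stated objective: alternative
-- what changed: B replaces A's stack-based DFS flood-fill plus second scan with a whole-grid fixed-point labeling: after an early exit when the start cell is not 'H', it repeatedly sweeps all 49 grid cells adding every hit cell adjacent to the component until a sweep adds nothing, then checks the component's neighbors for 'S' in one comprehension.
-- outside the precondition, e.g. on is_ship_sunk([['S', 'ab'], ['ab', 'H']], -1, 1): A returns True, B raises IndexError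
import Mathlib
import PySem

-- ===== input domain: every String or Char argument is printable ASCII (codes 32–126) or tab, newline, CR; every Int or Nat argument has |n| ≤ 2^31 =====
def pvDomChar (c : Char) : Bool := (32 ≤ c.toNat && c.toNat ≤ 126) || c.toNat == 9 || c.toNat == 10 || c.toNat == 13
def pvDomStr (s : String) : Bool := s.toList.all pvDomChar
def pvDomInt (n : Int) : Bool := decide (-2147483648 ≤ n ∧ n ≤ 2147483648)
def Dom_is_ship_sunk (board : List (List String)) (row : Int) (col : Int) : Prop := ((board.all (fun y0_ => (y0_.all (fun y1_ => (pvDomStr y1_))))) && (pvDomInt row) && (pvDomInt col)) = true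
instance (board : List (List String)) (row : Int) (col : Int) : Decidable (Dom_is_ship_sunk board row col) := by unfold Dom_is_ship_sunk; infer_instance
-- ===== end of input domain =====

-- B replaces A's stack DFS flood-fill + second scan with whole-grid fixed-point
-- labeling (repeated full-grid sweeps until stable) after an early not-'H' exit
-- (alternative algorithm; not faster).

-- shared cell access: board[r][c] with Python indexing (negative wrap); "" when Python raises
def pvCell (board : List (List String)) (r c : Int) : String :=
  ((PySem.List.pyGet? board r).bind (fun rw => PySem.List.pyGet? rw c)).getD ""

def pvDirs : List (Int × Int) := [(0, 1), (1, 0), (0, -1), (-1, 0)]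

def pvInB (n : Int) : Bool := decide (0 ≤ n) && decide (n < 7)

-- shared S-adjacency test: the identical expression appears in both Pythons' final 'any'
def pvHasAdjS (board : List (List String)) (r c : Int) : Bool :=
  pvDirs.any (fun d =>
    pvInB (r + d.1) && pvInB (c + d.2) && (pvCell board (r + d.1) (c + d.2) == "S"))

-- ===== PORT A =====
def pvNbrsA (r c : Int) : List (Int × Int) :=
  pvDirs.filterMap (fun d =>
    if pvInB (r + d.1) && pvInB (c + d.2) then some (r + d.1, c + d.2) else none)

-- A's while loop: pop, skip visited / non-'H', else record and push in-bounds neighbors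
-- (stack head = Python list tail; fuel 1000 exceeds the ≤256 steps any input can take)
def pvFloodA (board : List (List String)) :
    Nat → List (Int × Int) → PySem.Set (Int × Int) → PySem.Set (Int × Int)
  | 0, _, vis => vis
  | _ + 1, [], vis => vis
  | f + 1, (r, c) :: stack, vis =>
    if PySem.Set.contains vis (r, c) || pvCell board r c != "H" then
      pvFloodA board f stack vis
    else
      pvFloodA board f ((pvNbrsA r c).reverse ++ stack) (PySem.Set.add vis (r, c))

-- A's second pass: first visited cell with an in-bounds 'S' neighbor returns False
def pvScanA (board : List (List String)) : List (Int × Int) → Bool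
  | [] => true
  | (r, c) :: rest => if pvHasAdjS board r c then false else pvScanA board rest

def is_ship_sunk (board : List (List String)) (row : Int) (col : Int) : Bool :=
  pvScanA board (pvFloodA board 1000 [(row, col)] (PySem.Set.empty))

-- ===== PORT B =====
-- the 49 grid cells in B's comprehension order (r outer, c inner)
def pvGrid : List (Int × Int) :=
  (PySem.List.pyRange 0 7 1).flatMap (fun r => (PySem.List.pyRange 0 7 1).map (fun c => (r, c)))

-- 'any((r+dr, c+dc) in comp for dr, dc in DIRS)'
def pvTouches (comp : PySem.Set (Int × Int)) (r c : Int) : Bool :=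
  pvDirs.any (fun d => PySem.Set.contains comp (r + d.1, c + d.2))

-- B's frontier comprehension: unvisited hit cells adjacent to the component
def pvFrontier (board : List (List String)) (comp : PySem.Set (Int × Int)) :
    List (Int × Int) :=
  pvGrid.filter (fun p =>
    (pvCell board p.1 p.2 == "H") && !PySem.Set.contains comp p && pvTouches comp p.1 p.2)

-- B's 'while True' loop: sweep to a fixed point (fuel 60 exceeds the ≤50 possible sweeps)
def pvGrow (board : List (List String)) :
    Nat → PySem.Set (Int × Int) → PySem.Set (Int × Int)
  | 0, comp => comp
  | f + 1, comp =>
    let fr := pvFrontier board comp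
    if fr.isEmpty then comp else pvGrow board f (PySem.Set.update comp fr)

def is_ship_sunk_alt (board : List (List String)) (row : Int) (col : Int) : Bool :=
  if pvCell board row col != "H" then true
  else
    ! (pvGrow board 60 (PySem.Set.ofList [(row, col)])).any
        (fun p => pvHasAdjS board p.1 p.2)

-- ===== PRECONDITION & SPEC =====
-- Pre_ excludes inputs on which the Python raises IndexError: an out-of-range start index,
-- or a start cell 'H' on a board lacking a full 7×7 region (A's flood may then index a
-- missing row or cell, and B's grid sweep indexes all 49 cells; ragged boards whose short
-- rows A's flood happens not to reach are excluded too, B raising there — see the cite in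
-- claim.json).
def Pre_is_ship_sunk (board : List (List String)) (row : Int) (col : Int) : Prop :=
  (((PySem.List.pyGet? board row).bind (fun rw => PySem.List.pyGet? rw col)).isSome = true) ∧
  (((PySem.List.pyGet? board row).bind (fun rw => PySem.List.pyGet? rw col)) = some "H" →
    7 ≤ board.length ∧ ∀ rw ∈ board.take 7, 7 ≤ rw.length)
instance (board : List (List String)) (row : Int) (col : Int) : Decidable (Pre_is_ship_sunk board row col) := by unfold Pre_is_ship_sunk; infer_instance

def pvWitness_is_ship_sunk : List (List String) × Int × Int := ([["W"]], 0, 0)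

def Spec_is_ship_sunk (board : List (List String)) (row : Int) (col : Int) (out : Bool) : Prop := out = is_ship_sunk_alt board row col
instance (board : List (List String)) (row : Int) (col : Int) (out : Bool) : Decidable (Spec_is_ship_sunk board row col out) := by unfold Spec_is_ship_sunk; infer_instance

-- ===== CLAIM (what is proved, stated in full; the proofs are below) =====
def Claim_equal_is_ship_sunk : Prop := ∀ (board : List (List String)) (row : Int) (col : Int), Dom_is_ship_sunk board row col → Pre_is_ship_sunk board row col → Spec_is_ship_sunk board row col (is_ship_sunk board row col)

-- ===== LEMMAS AND PROOFS =====

-- the hit-component relation both programs compute: cells reachable from the start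
-- through in-bounds 'H' cells
inductive pvReach (board : List (List String)) (s : Int × Int) : Int × Int → Prop
  | base : pvReach board s s
  | step (p q : Int × Int) : pvReach board s p → q ∈ pvNbrsA p.1 p.2 →
      pvCell board q.1 q.2 = "H" → pvReach board s q

def pvSound (board : List (List String)) (s : Int × Int) (V : List (Int × Int)) : Prop :=
  ∀ p ∈ V, pvReach board s p

def pvClosed (board : List (List String)) (V : List (Int × Int)) : Prop :=
  ∀ p ∈ V, ∀ q ∈ pvNbrsA p.1 p.2, pvCell board q.1 q.2 = "H" → q ∈ V

-- the 50-cell universe every visited/component cell lives in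
def pvU (s : Int × Int) : List (Int × Int) := s :: pvGrid

theorem mem_nbrsA (q : Int × Int) (r c : Int) :
    q ∈ pvNbrsA r c ↔
      ∃ d ∈ pvDirs, (pvInB (r + d.1) && pvInB (c + d.2)) = true ∧ q = (r + d.1, c + d.2) := by
  constructor
  · intro h
    simp only [pvNbrsA, List.mem_filterMap] at h
    obtain ⟨d, hd, hs⟩ := h
    by_cases hb : (pvInB (r + d.1) && pvInB (c + d.2)) = true
    · simp only [hb, if_true, Option.some.injEq] at hs
      exact ⟨d, hd, hb, hs.symm⟩
    · simp [hb] at hs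
  · rintro ⟨d, hd, hb, rfl⟩
    simp only [pvNbrsA, List.mem_filterMap]
    exact ⟨d, hd, by simp [hb]⟩

theorem dirs_neg (d : Int × Int) (h : d ∈ pvDirs) : (-d.1, -d.2) ∈ pvDirs := by
  simp only [pvDirs, List.mem_cons, List.not_mem_nil, or_false] at h ⊢
  rcases h with rfl | rfl | rfl | rfl <;> norm_num

theorem mem_pvGrid (q : Int × Int) : q ∈ pvGrid ↔ (pvInB q.1 && pvInB q.2) = true := by
  obtain ⟨r, c⟩ := q
  simp only [pvGrid, List.mem_flatMap, List.mem_map, PySem.List.mem_pyRange_one, pvInB,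
    Bool.and_eq_true, decide_eq_true_eq, Prod.mk.injEq]
  constructor
  · rintro ⟨a, ⟨ha1, ha2⟩, b, ⟨hb1, hb2⟩, rfl, rfl⟩
    exact ⟨⟨ha1, ha2⟩, hb1, hb2⟩
  · rintro ⟨⟨h1, h2⟩, h3, h4⟩
    exact ⟨r, ⟨h1, h2⟩, c, ⟨h3, h4⟩, rfl, rfl⟩

theorem nbrs_subset_grid (q : Int × Int) (r c : Int) (h : q ∈ pvNbrsA r c) : q ∈ pvGrid := by
  rw [mem_nbrsA] at h
  obtain ⟨d, hd, hb, rfl⟩ := h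
  rw [mem_pvGrid]
  simpa using hb

theorem nodup_pvGrid : pvGrid.Nodup := by decide

theorem length_nbrsA_le (r c : Int) : (pvNbrsA r c).length ≤ 4 := by
  have := List.length_filterMap_le
    (fun d : Int × Int =>
      if pvInB (r + d.1) && pvInB (c + d.2) then some (r + d.1, c + d.2) else none) pvDirs
  simpa [pvNbrsA, pvDirs] using this

theorem length_le_of_nodup_subset_U (s : Int × Int) (V : List (Int × Int))
    (hn : V.Nodup) (hs : ∀ p ∈ V, p ∈ pvU s) : V.length ≤ 50 := by
  have hsub : V ⊆ pvU s := fun p hp => hs p hp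
  have := (List.subperm_of_subset hn hsub).length_le
  have hU : (pvU s).length = 50 := by simp [pvU]; decide
  omega

-- any two start-containing, sound, closed sets have the same members
theorem reach_mem (board : List (List String)) (s : Int × Int) (V : List (Int × Int))
    (hs : s ∈ V) (hc : pvClosed board V) : ∀ p, pvReach board s p → p ∈ V := by
  intro p hp
  induction hp with
  | base => exact hs
  | step p q _ hadj hH ih => exact hc p ih q hadj hH

theorem any_congr {α : Type} (l₁ l₂ : List α) (f : α → Bool)
    (h : ∀ x, x ∈ l₁ ↔ x ∈ l₂) : l₁.any f = l₂.any f := by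
  cases e : l₂.any f with
  | false =>
    rw [List.any_eq_false] at e ⊢
    exact fun x hx => e x ((h x).1 hx)
  | true =>
    rw [List.any_eq_true] at e ⊢
    obtain ⟨x, hx, hf⟩ := e
    exact ⟨x, (h x).2 hx, hf⟩

-- ---- A-side: the flood-fill result contains the start, is sound and closed ----

theorem floodA_mono (board : List (List String)) :
    ∀ (f : Nat) (s : List (Int × Int)) (vis : PySem.Set (Int × Int)) (p : Int × Int),
      p ∈ vis → p ∈ pvFloodA board f s vis := by
  intro f
  induction f with
  | zero => intro s vis p hp; simpa [pvFloodA] using hp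
  | succ f ih =>
    intro s vis p hp
    cases s with
    | nil => simpa [pvFloodA] using hp
    | cons q stack =>
      obtain ⟨r, c⟩ := q
      simp only [pvFloodA]
      split
      · exact ih _ _ _ hp
      · exact ih _ _ _ ((PySem.Set.mem_add _ _ _).mpr (Or.inl hp))

theorem floodA_sound (board : List (List String)) (s : Int × Int) :
    ∀ (f : Nat) (stack vis : List (Int × Int)),
      pvSound board s vis →
      (∀ p ∈ stack, p = s ∨ ∃ q, pvReach board s q ∧ p ∈ pvNbrsA q.1 q.2) →
      pvSound board s (pvFloodA board f stack vis) := by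
  intro f
  induction f with
  | zero => intro stack vis hv _; simpa [pvFloodA] using hv
  | succ f ih =>
    intro stack vis hv hst
    cases stack with
    | nil => simpa [pvFloodA] using hv
    | cons p tail =>
      obtain ⟨r, c⟩ := p
      simp only [pvFloodA]
      split
      · exact ih tail vis hv (fun p hp => hst p (List.mem_cons_of_mem _ hp))
      · rename_i hcond
        simp only [Bool.or_eq_true, not_or, PySem.Set.contains_eq_listContains,
          bne_iff_ne, ne_eq, not_not] at hcond
        obtain ⟨hc, hH⟩ := hcond
        have hreach : pvReach board s (r, c) := by
          rcases hst (r, c) (List.mem_cons_self) with rfl | ⟨q, hq, hadj⟩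
          · exact pvReach.base
          · exact pvReach.step q (r, c) hq hadj hH
        apply ih
        · intro p hp
          rcases (PySem.Set.mem_add _ _ _).mp hp with hp | rfl
          · exact hv p hp
          · exact hreach
        · intro p hp
          rcases List.mem_append.mp hp with hl | hr
          · exact Or.inr ⟨(r, c), hreach, List.mem_reverse.mp hl⟩
          · exact hst p (List.mem_cons_of_mem _ hr)

theorem floodA_closed (board : List (List String)) (s : Int × Int) :
    ∀ (f : Nat) (stack vis : List (Int × Int)),
      vis.Nodup → (∀ p ∈ vis, p ∈ pvU s) → (∀ p ∈ stack, p ∈ pvU s) →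
      (∀ p ∈ vis, ∀ q ∈ pvNbrsA p.1 p.2, pvCell board q.1 q.2 = "H" → q ∈ vis ∨ q ∈ stack) →
      5 * (51 - vis.length) + stack.length ≤ f →
      pvClosed board (pvFloodA board f stack vis) := by
  intro f
  induction f with
  | zero =>
    intro stack vis hn hvU _ _ hm
    have := length_le_of_nodup_subset_U s vis hn hvU
    omega
  | succ f ih =>
    intro stack vis hn hvU hsU hJ hm
    cases stack with
    | nil =>
      simp only [pvFloodA]
      intro p hp q hq hH
      rcases hJ p hp q hq hH with h | h
      · exact h
      · simp at h
    | cons p tail =>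
      obtain ⟨r, c⟩ := p
      simp only [pvFloodA]
      split
      · rename_i hcond
        simp only [Bool.or_eq_true, PySem.Set.contains_eq_listContains,
          List.contains_eq_mem, decide_eq_true_eq, bne_iff_ne, ne_eq] at hcond
        apply ih tail vis hn hvU (fun p hp => hsU p (List.mem_cons_of_mem _ hp))
        · intro p hp q hq hH
          rcases hJ p hp q hq hH with h1 | h1
          · exact Or.inl h1
          · rcases List.mem_cons.mp h1 with rfl | h2
            · rcases hcond with h3 | h3
              · exact Or.inl h3
              · exact absurd hH h3
            · exact Or.inr h2
        · simp only [List.length_cons] at hm; omega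
      · rename_i hcond
        simp only [Bool.or_eq_true, not_or, PySem.Set.contains_eq_listContains,
          List.contains_eq_mem, decide_eq_true_eq, bne_iff_ne, ne_eq, not_not] at hcond
        obtain ⟨hc, hH⟩ := hcond
        have hadd : PySem.Set.add vis (r, c) = vis ++ [(r, c)] :=
          PySem.Set.add_of_not_mem hc
        have hn' : (PySem.Set.add vis (r, c)).Nodup := by
          rw [hadd, ← List.concat_eq_append]
          exact List.Nodup.concat hc hn
        have hvU' : ∀ p ∈ PySem.Set.add vis (r, c), p ∈ pvU s := by
          intro p hp
          rw [hadd] at hp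
          rcases List.mem_append.mp hp with h1 | h1
          · exact hvU p h1
          · have : p = (r, c) := by simpa using h1
            subst this
            exact hsU _ (List.mem_cons_self)
        apply ih _ _ hn' hvU'
        · intro p hp
          rcases List.mem_append.mp hp with h1 | h1
          · exact List.mem_cons_of_mem _ (nbrs_subset_grid p r c (List.mem_reverse.mp h1))
          · exact hsU p (List.mem_cons_of_mem _ h1)
        · intro p hp q hq hH'
          rw [hadd] at hp
          rcases List.mem_append.mp hp with h1 | h1
          · rcases hJ p h1 q hq hH' with h2 | h2
            · exact Or.inl (by rw [hadd]; exact List.mem_append_left _ h2)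
            · rcases List.mem_cons.mp h2 with rfl | h3
              · exact Or.inl (by rw [hadd]; exact List.mem_append_right _ (by simp))
              · exact Or.inr (List.mem_append_right _ h3)
          · have : p = (r, c) := by simpa using h1
            subst this
            exact Or.inr (List.mem_append_left _ (List.mem_reverse.mpr hq))
        · have hlen : (PySem.Set.add vis (r, c)).length = vis.length + 1 := by
            rw [hadd]; simp
          have hle := length_le_of_nodup_subset_U s _ hn' hvU'
          have hnb := length_nbrsA_le r c
          rw [hlen]
          simp only [List.length_append, List.length_reverse, List.length_cons] at hm ⊢
          omega

theorem floodA_start (board : List (List String)) (s : Int × Int)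
    (h : pvCell board s.1 s.2 = "H") :
    s ∈ pvFloodA board 1000 [s] PySem.Set.empty := by
  obtain ⟨r, c⟩ := s
  rw [show (1000 : Nat) = 999 + 1 from by norm_num]
  have hcond : (PySem.Set.contains PySem.Set.empty (r, c) || pvCell board r c != "H") = false := by
    simp [PySem.Set.empty, PySem.Set.contains, h]
  simp only [pvFloodA, hcond, Bool.false_eq_true, if_false]
  exact floodA_mono board _ _ _ _ ((PySem.Set.mem_add _ _ _).mpr (Or.inr rfl))

-- ---- B-side: the fixed-point component contains the start, is sound and closed ----

theorem mem_frontier (board : List (List String)) (comp : PySem.Set (Int × Int))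
    (q : Int × Int) :
    q ∈ pvFrontier board comp ↔
      q ∈ pvGrid ∧ pvCell board q.1 q.2 = "H" ∧ q ∉ comp ∧
        ∃ d ∈ pvDirs, (q.1 + d.1, q.2 + d.2) ∈ comp := by
  simp only [pvFrontier, List.mem_filter, Bool.and_eq_true, Bool.not_eq_true',
    beq_iff_eq, pvTouches, List.any_eq_true, PySem.Set.contains_eq_listContains,
    List.contains_eq_mem, decide_eq_true_eq, decide_eq_false_iff_not]
  tauto

theorem grow_mono (board : List (List String)) :
    ∀ (f : Nat) (comp : PySem.Set (Int × Int)) (p : Int × Int),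
      p ∈ comp → p ∈ pvGrow board f comp := by
  intro f
  induction f with
  | zero => intro comp p hp; simpa [pvGrow] using hp
  | succ f ih =>
    intro comp p hp
    simp only [pvGrow]
    split
    · exact hp
    · exact ih _ p ((PySem.Set.mem_update _ _ _).mpr (Or.inl hp))

theorem grow_sound (board : List (List String)) (s : Int × Int) :
    ∀ (f : Nat) (comp : PySem.Set (Int × Int)),
      pvSound board s comp → pvSound board s (pvGrow board f comp) := by
  intro f
  induction f with
  | zero => intro comp hv; simpa [pvGrow] using hv
  | succ f ih =>
    intro comp hv
    simp only [pvGrow]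
    split
    · exact hv
    · apply ih
      intro q hq
      rcases (PySem.Set.mem_update _ _ _).mp hq with h1 | h1
      · exact hv q h1
      · rw [mem_frontier] at h1
        obtain ⟨hg, hH, _, d, hd, hmem⟩ := h1
        have hq' : q ∈ pvNbrsA (q.1 + d.1) (q.2 + d.2) := by
          rw [mem_nbrsA]
          refine ⟨(-d.1, -d.2), dirs_neg d hd, ?_, ?_⟩
          · simpa [mem_pvGrid] using hg
          · simp
        exact pvReach.step _ q (hv _ hmem) hq' hH

theorem grow_fix (board : List (List String)) (s : Int × Int) :
    ∀ (f : Nat) (comp : PySem.Set (Int × Int)),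
      comp.Nodup → (∀ p ∈ comp, p ∈ pvU s) → 51 - comp.length ≤ f →
      pvFrontier board (pvGrow board f comp) = [] := by
  intro f
  induction f with
  | zero =>
    intro comp hn hU hm
    have := length_le_of_nodup_subset_U s comp hn hU
    omega
  | succ f ih =>
    intro comp hn hU hm
    simp only [pvGrow]
    split
    · rename_i h
      exact List.isEmpty_iff.mp h
    · rename_i h
      have hfrn : (pvFrontier board comp).Nodup := List.Nodup.filter _ nodup_pvGrid
      have hdisj : ∀ x ∈ pvFrontier board comp, x ∉ comp := by
        intro x hx
        exact ((mem_frontier board comp x).mp hx).2.2.1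
      have hupd : PySem.Set.update comp (pvFrontier board comp) =
          comp ++ pvFrontier board comp :=
        PySem.Set.update_eq_append_of_disjoint comp (pvFrontier board comp) hfrn hdisj
      apply ih
      · exact PySem.Set.nodup_update _ _ hn
      · intro p hp
        rcases (PySem.Set.mem_update _ _ _).mp hp with h1 | h1
        · exact hU p h1
        · exact List.mem_cons_of_mem _ ((mem_frontier board comp p).mp h1).1
      · have hne : pvFrontier board comp ≠ [] := by
          intro hc; rw [hc] at h; simp at h
        have hpos : 0 < (pvFrontier board comp).length := List.length_pos_of_ne_nil hne
        have : (PySem.Set.update comp (pvFrontier board comp)).length =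
            comp.length + (pvFrontier board comp).length := by
          rw [hupd]; simp
        omega

theorem grow_closed_of_fix (board : List (List String)) (V : PySem.Set (Int × Int))
    (h : pvFrontier board V = []) : pvClosed board V := by
  intro p hp q hq hH
  by_contra hq'
  have hmem : q ∈ pvFrontier board V := by
    rw [mem_frontier]
    refine ⟨nbrs_subset_grid q p.1 p.2 hq, hH, hq', ?_⟩
    rw [mem_nbrsA] at hq
    obtain ⟨d, hd, _, hqe⟩ := hq
    refine ⟨(-d.1, -d.2), dirs_neg d hd, ?_⟩
    have h1 : q.1 = p.1 + d.1 := by rw [hqe]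
    have h2 : q.2 = p.2 + d.2 := by rw [hqe]
    have : (q.1 + -d.1, q.2 + -d.2) = p := by
      apply Prod.ext <;> simp [h1, h2]
    rwa [this]
  rw [h] at hmem
  simp at hmem

-- ---- assembling ----

theorem pvScanA_eq_any (board : List (List String)) (l : List (Int × Int)) :
    pvScanA board l = ! l.any (fun p => pvHasAdjS board p.1 p.2) := by
  induction l with
  | nil => rfl
  | cons p rest ih =>
    obtain ⟨r, c⟩ := p
    by_cases h : pvHasAdjS board r c = true <;> simp [pvScanA, ih, h]

-- ===== VERDICT (by name: the statement is the Claim_ definition above) =====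
theorem is_ship_sunk_spec : Claim_equal_is_ship_sunk := by
  intro board row col _ _
  unfold Spec_is_ship_sunk is_ship_sunk is_ship_sunk_alt
  by_cases h : pvCell board row col = "H"
  · have hb : (pvCell board row col != "H") = false := by simp [h]
    rw [if_neg (by simp [hb])]
    rw [pvScanA_eq_any]
    have hA1 : (row, col) ∈ pvFloodA board 1000 [(row, col)] PySem.Set.empty :=
      floodA_start board (row, col) h
    have hA2 : pvSound board (row, col) (pvFloodA board 1000 [(row, col)] PySem.Set.empty) :=
      floodA_sound board (row, col) 1000 [(row, col)] PySem.Set.empty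
        (fun p hp => by simp [PySem.Set.empty] at hp)
        (fun p hp => Or.inl (by simpa using hp))
    have hA3 : pvClosed board (pvFloodA board 1000 [(row, col)] PySem.Set.empty) := by
      apply floodA_closed board (row, col) 1000 [(row, col)] PySem.Set.empty
      · exact List.nodup_nil
      · intro p hp; simp [PySem.Set.empty] at hp
      · intro p hp
        have : p = (row, col) := by simpa using hp
        subst this
        exact List.mem_cons_self
      · intro p hp; simp [PySem.Set.empty] at hp
      · simp [PySem.Set.empty]
    have hB0 : (row, col) ∈ PySem.Set.ofList [((row : Int), (col : Int))] := by
      rw [PySem.Set.mem_ofList]; simp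
    have hB1 : (row, col) ∈ pvGrow board 60 (PySem.Set.ofList [((row : Int), (col : Int))]) :=
      grow_mono board 60 _ _ hB0
    have hB2 : pvSound board (row, col)
        (pvGrow board 60 (PySem.Set.ofList [((row : Int), (col : Int))])) := by
      apply grow_sound
      intro p hp
      have : p = (row, col) := by simpa [PySem.Set.mem_ofList] using hp
      subst this
      exact pvReach.base
    have hB3 : pvClosed board
        (pvGrow board 60 (PySem.Set.ofList [((row : Int), (col : Int))])) := by
      apply grow_closed_of_fix
      apply grow_fix board (row, col) 60
      · exact PySem.Set.nodup_ofList _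
      · intro p hp
        have : p = (row, col) := by simpa [PySem.Set.mem_ofList] using hp
        subst this
        exact List.mem_cons_self
      · have : (PySem.Set.ofList [((row : Int), (col : Int))]).length ≤ 1 :=
          PySem.Set.length_ofList_le _
        omega
    have hmem : ∀ p, p ∈ pvFloodA board 1000 [(row, col)] PySem.Set.empty ↔
        p ∈ pvGrow board 60 (PySem.Set.ofList [((row : Int), (col : Int))]) := by
      intro p
      constructor
      · intro hp
        exact reach_mem board (row, col) _ hB1 hB3 p (hA2 p hp)
      · intro hp
        exact reach_mem board (row, col) _ hA1 hA3 p (hB2 p hp)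
    rw [any_congr _ _ _ hmem]
  · have hb : (pvCell board row col != "H") = true := by simp [h]
    rw [if_pos (by simp [hb])]
    rw [show (1000 : Nat) = 999 + 1 from by norm_num]
    have hcond : (PySem.Set.contains PySem.Set.empty ((row : Int), (col : Int)) ||
        pvCell board row col != "H") = true := by simp [hb]
    simp only [pvFloodA, hcond, if_true]
    rfl
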